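-- pv_equiv track=rewrite | github.com/itsvaibhavcoder/Python | Codes/ReverseStringWithCondition.py | reverse_string_with_condition
-- ===== SOURCE A (Python) =====
-- def reverse_string_with_condition(input_str):
--     reversed_str = ""
--     found_hash = False
--
--     for char in input_str:
--         if char == '#':
--             found_hash = not found_hash
--         elif found_hash:
--             reversed_str = char + reversed_str
--
--     return reversed_str
-- ===== SOURCE B (Python) =====
-- def reverse_string_with_condition(input_str):
--     parts = input_str.split('#')
--     return ''.join(parts[1::2])[::-1]
-- ===== Notes on version B (the rewrite author's own statement) =====
-- stated objective: faster
-- what changed: Replaces the toggle loop that prepends each kept char to the growing result string (quadratic string building) by split on the hash separator, join of the odd-indexed segments, and one final whole-string reverse.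
import Mathlib
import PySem

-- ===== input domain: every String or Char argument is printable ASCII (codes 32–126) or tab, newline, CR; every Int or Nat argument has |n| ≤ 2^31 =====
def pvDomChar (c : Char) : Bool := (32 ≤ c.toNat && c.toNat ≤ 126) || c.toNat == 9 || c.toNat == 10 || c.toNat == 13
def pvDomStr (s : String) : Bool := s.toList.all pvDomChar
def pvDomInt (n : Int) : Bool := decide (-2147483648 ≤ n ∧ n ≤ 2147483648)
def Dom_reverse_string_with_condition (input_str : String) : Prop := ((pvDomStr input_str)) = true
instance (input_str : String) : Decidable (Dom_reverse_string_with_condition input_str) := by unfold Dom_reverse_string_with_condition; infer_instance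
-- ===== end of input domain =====

-- B replaces A's toggle loop, which prepends each kept char to the growing result string, by split on
-- the hash separator, join of the odd-indexed segments, and one final whole-string reverse (objective: faster, as measured).

-- ===== PORT A =====
-- the loop over the chars; state = (reversed_str as a char list, found_hash)
def pvLoopA : List Char → List Char → Bool → List Char
  | [], acc, _ => acc
  | c :: rest, acc, f =>
    if c = '#' then pvLoopA rest acc (!f)
    else if f then pvLoopA rest (c :: acc) f
    else pvLoopA rest acc f

def reverse_string_with_condition (input_str : String) : String :=
  String.ofList (pvLoopA input_str.toList [] false)

-- ===== PORT B =====
def reverse_string_with_condition_alt (input_str : String) : String :=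
  let parts : List String := (PySem.Str.split? input_str "#").getD []          -- input_str.split('#'); sep ≠ "" so never none
  let odd : List String := (PySem.List.slice? parts (some 1) none 2).getD []    -- parts[1::2]; step ≠ 0 so never none
  let joined : String := PySem.Str.join "" odd                                  -- ''.join(...)
  (PySem.Str.slice? joined none none (-1)).getD ""                              -- [::-1]; step ≠ 0 so never none

-- ===== PRECONDITION & SPEC =====
def Spec_reverse_string_with_condition (input_str : String) (out : String) : Prop := out = reverse_string_with_condition_alt input_str
instance (input_str : String) (out : String) : Decidable (Spec_reverse_string_with_condition input_str out) := by unfold Spec_reverse_string_with_condition; infer_instance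

-- ===== CLAIM (what is proved, stated in full; the proofs are below) =====
def Claim_equal_reverse_string_with_condition : Prop := ∀ (input_str : String), Dom_reverse_string_with_condition input_str → Spec_reverse_string_with_condition input_str (reverse_string_with_condition input_str)

-- ===== LEMMAS AND PROOFS =====

-- structural model of str.split('#')
def pvPrep (x : List Char) : List (List Char) → List (List Char)
  | [] => [x]
  | h :: t => (x ++ h) :: t

def pvSplit : List Char → List (List Char)
  | [] => [[]]
  | c :: r => if c = '#' then [] :: pvSplit r else pvPrep [c] (pvSplit r)

-- the chars A keeps, as a function of the toggle flag
def pvSel : Bool → List Char → List Char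
  | _, [] => []
  | f, c :: r => if c = '#' then pvSel (!f) r else (if f then c :: pvSel f r else pvSel f r)

-- alternate segments of a parts list, the first taken iff b
def pvPick (b : Bool) : List (List Char) → List Char
  | [] => []
  | p :: t => (if b then p else []) ++ pvPick (!b) t

-- odd-indexed elements of a list
def pvOdd {α : Type} : List α → List α
  | [] => []
  | [_] => []
  | _ :: b :: t => b :: pvOdd t

theorem pvSplit_ne_nil (l : List Char) : pvSplit l ≠ [] := by
  cases l with
  | nil => simp [pvSplit]
  | cons c r =>
    simp only [pvSplit]
    split
    · simp
    · cases h : pvSplit r <;> simp [pvPrep]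

theorem pvPrep_nil_of_ne (L : List (List Char)) (h : L ≠ []) : pvPrep [] L = L := by
  cases L with
  | nil => exact absurd rfl h
  | cons a t => simp [pvPrep]

theorem pvPrep_prep (x y : List Char) (L : List (List Char)) :
    pvPrep x (pvPrep y L) = pvPrep (x ++ y) L := by
  cases L <;> simp [pvPrep]

theorem pv_go_eq (fuel : Nat) : ∀ (l cur : List Char) (acc : List (List Char)),
    l.length ≤ fuel →
    PySem.Chars.splitOn.go ['#'] fuel l cur acc = acc.reverse ++ pvPrep cur.reverse (pvSplit l) := by
  induction fuel with
  | zero =>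
    intro l cur acc h
    have hl : l = [] := by cases l <;> simp_all
    subst hl
    rw [PySem.Chars.splitOn.go]
    simp [pvSplit, pvPrep]
  | succ fuel ih =>
    intro l cur acc h
    cases l with
    | nil =>
      rw [PySem.Chars.splitOn.go]
      · simp [pvSplit, pvPrep]
      · omega
    | cons c rest =>
      rw [PySem.Chars.splitOn.go]
      by_cases hc : c = '#'
      · subst hc
        have hp : (['#'].isPrefixOf ('#' :: rest)) = true := by simp [List.isPrefixOf]
        rw [if_pos hp]
        simp only [List.length] at h
        rw [show List.drop (['#'].length) ('#' :: rest) = rest by simp]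
        rw [ih rest [] (cur.reverse :: acc) (by omega)]
        simp only [List.reverse_nil]
        rw [pvPrep_nil_of_ne _ (pvSplit_ne_nil rest)]
        simp [pvSplit, pvPrep]
      · have hp : (['#'].isPrefixOf (c :: rest)) = false := by
          simp [List.isPrefixOf]
          exact fun h' => hc h'.symm
        rw [if_neg (by simp [hp])]
        simp only [List.length] at h
        rw [ih rest (c :: cur) acc (by omega)]
        simp only [pvSplit, if_neg hc, List.reverse_cons]
        rw [pvPrep_prep]

theorem pv_splitOn_eq (l : List Char) : PySem.Chars.splitOn l ['#'] = pvSplit l := by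
  unfold PySem.Chars.splitOn
  rw [pv_go_eq (l.length + 1) l [] [] (by omega)]
  simp [pvPrep_nil_of_ne _ (pvSplit_ne_nil l)]

theorem pvLoopA_eq : ∀ (l acc : List Char) (f : Bool),
    pvLoopA l acc f = (pvSel f l).reverse ++ acc := by
  intro l
  induction l with
  | nil => intro acc f; simp [pvLoopA, pvSel]
  | cons c r ih =>
    intro acc f
    by_cases hc : c = '#'
    · simp [pvLoopA, pvSel, hc, ih]
    · by_cases hf : f = true
      · simp [pvLoopA, pvSel, hc, hf, ih]
      · simp at hf; simp [pvLoopA, pvSel, hc, hf, ih]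

theorem pvSel_eq_pick : ∀ (l : List Char) (f : Bool), pvSel f l = pvPick f (pvSplit l) := by
  intro l
  induction l with
  | nil => intro f; simp [pvSel, pvSplit, pvPick]
  | cons c r ih =>
    intro f
    by_cases hc : c = '#'
    · simp [pvSel, pvSplit, pvPick, hc, ih]
    · obtain ⟨h, t, ht⟩ : ∃ h t, pvSplit r = h :: t := by
        cases hs : pvSplit r with
        | nil => exact absurd hs (pvSplit_ne_nil r)
        | cons h t => exact ⟨h, t, rfl⟩
      simp only [pvSel, pvSplit, if_neg hc]
      rw [ht]
      simp only [pvPrep, List.singleton_append, pvPick]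
      rw [ih f, ht]
      simp only [pvPick]
      cases f <;> simp

theorem pvOdd_flatten : ∀ (L : List (List Char)), (pvOdd L).flatten = pvPick false L := by
  intro L
  induction L using pvOdd.induct with
  | case1 => simp [pvOdd, pvPick]
  | case2 a => simp [pvOdd, pvPick]
  | case3 a b t ih => simp [pvOdd, pvPick, ih]

theorem pvOdd_map {α β : Type} (f : α → β) : ∀ (L : List α), pvOdd (L.map f) = (pvOdd L).map f := by
  intro L
  induction L using pvOdd.induct with
  | case1 => simp [pvOdd]
  | case2 a => simp [pvOdd]
  | case3 a b t ih => simp [pvOdd, ih]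

theorem pv_filterMap_odd {α : Type} : ∀ (xs : List α),
    List.filterMap (fun k => xs[1 + 2 * k]?) (List.range (xs.length / 2)) = pvOdd xs := by
  intro xs
  induction xs using pvOdd.induct with
  | case1 => simp [pvOdd]
  | case2 a => simp [pvOdd]
  | case3 a b t ih =>
    have hlen : (a :: b :: t).length / 2 = t.length / 2 + 1 := by simp; omega
    rw [hlen, List.range_succ_eq_map]
    simp only [List.filterMap_cons, List.filterMap_map]
    have h0 : (a :: b :: t)[1 + 2 * 0]? = some b := by simp
    rw [h0]
    have hfun : ∀ k : Nat, (a :: b :: t)[1 + 2 * (k + 1)]? = t[1 + 2 * k]? := by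
      intro k
      have : 1 + 2 * (k + 1) = (1 + 2 * k) + 2 := by omega
      rw [this]
      simp [List.getElem?_cons_succ]
    simp only [Function.comp_def, hfun]
    rw [ih]
    rfl

theorem pv_slice?_odd {α : Type} (xs : List α) :
    PySem.List.slice? xs (some 1) none 2 = some (pvOdd xs) := by
  cases xs with
  | nil =>
    unfold PySem.List.slice? PySem.List.sliceIndices
    norm_num [pvOdd]
  | cons a t =>
    unfold PySem.List.slice? PySem.List.sliceIndices
    norm_num
    have hc : (if 0 < t.length then (((t.length : Int) + 2 - 1) / 2).toNat else 0)
        = (a :: t).length / 2 := by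
      split
      · have h1 : ((t.length : Int) + 2 - 1) = ((t.length + 1 : Nat) : Int) := by push_cast; ring
        rw [h1, show ((2 : Int)) = ((2 : Nat) : Int) by rfl, ← Int.natCast_div, Int.toNat_natCast]
        simp
      · have h0 : t.length = 0 := by omega
        simp [h0]
    rw [hc, ← pv_filterMap_odd (a :: t)]
    apply List.filterMap_congr
    intro k _
    have hk : ((1 : Int) + 2 * (k : Int)).toNat = 1 + 2 * k := by omega
    rw [hk]

theorem pv_join_nil_flatten : ∀ (L : List (List Char)), PySem.Chars.join [] L = L.flatten := by
  intro L
  induction L with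
  | nil => rfl
  | cons a t ih =>
    cases t with
    | nil => simp [PySem.Chars.join, List.intercalate]
    | cons b t' =>
      rw [PySem.Chars.join_cons_cons, ih]
      simp

theorem pv_split?_eq (s : String) :
    PySem.Str.split? s "#" = some ((pvSplit s.toList).map String.ofList) := by
  unfold PySem.Str.split?
  rw [show ("#" : String).toList = ['#'] by simp]
  unfold PySem.Chars.split?
  rw [if_neg (by simp)]
  simp [pv_splitOn_eq]

-- ===== VERDICT (by name: the statement is the Claim_ definition above) =====
theorem reverse_string_with_condition_spec : Claim_equal_reverse_string_with_condition := by
  intro s _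
  unfold Spec_reverse_string_with_condition reverse_string_with_condition reverse_string_with_condition_alt
  rw [pv_split?_eq]
  simp only [Option.getD_some]
  rw [pv_slice?_odd]
  simp only [Option.getD_some]
  rw [PySem.Str.slice?_none_none_neg_one]
  simp only [Option.getD_some]
  rw [pvLoopA_eq]
  have hjoin : (PySem.Str.join "" (pvOdd ((pvSplit s.toList).map String.ofList))).toList
      = (pvOdd (pvSplit s.toList)).flatten := by
    rw [PySem.Str.toList_join]
    rw [show ("" : String).toList = [] by simp]
    rw [pvOdd_map, List.map_map]
    rw [show (String.toList ∘ String.ofList) = id by funext l; simp]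
    rw [List.map_id]
    exact pv_join_nil_flatten _
  refine congrArg String.ofList ?_
  rw [hjoin, pvOdd_flatten, ← pvSel_eq_pick, List.append_nil]
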